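-- pv_equiv track=rewrite | github.com/mtucker502/jcli | src/jcli/safety/blocklist.py | _split_pattern_tokens
-- ===== SOURCE A (Python) =====
-- def _split_pattern_tokens(pattern_line: str) -> list[str]:
--     """Split pattern into tokens, preserving spaces inside regex char classes like [^ ]+."""
--     tokens: list[str] = []
--     current: list[str] = []
--     in_char_class = False
--     escaped = False
--
--     for ch in pattern_line:
--         if escaped:
--             current.append(ch)
--             escaped = False
--             continue
--
--         if ch == "\\":
--             current.append(ch)
--             escaped = True
--             continue
--
--         if ch == "[":
--             in_char_class = True
--             current.append(ch)
--             continue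
--
--         if ch == "]" and in_char_class:
--             in_char_class = False
--             current.append(ch)
--             continue
--
--         if ch.isspace() and not in_char_class:
--             if current:
--                 tokens.append("".join(current))
--                 current = []
--             continue
--
--         current.append(ch)
--
--     if current:
--         tokens.append("".join(current))
--
--     return tokens
-- ===== SOURCE B (Python) =====
-- def _split_pattern_tokens(pattern_line: str) -> list[str]:
--     """Two-pointer tokenizer: skip whitespace, then scan one token's span and slice it out."""
--     tokens = []
--     n = len(pattern_line)
--     i = 0
--     while i < n:
--         if pattern_line[i].isspace():
--             i += 1
--             continue
--         start = i
--         in_class = False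
--         while i < n:
--             c = pattern_line[i]
--             if c == "\\":
--                 i += 2
--             elif c == "[":
--                 in_class = True
--                 i += 1
--             elif c == "]" and in_class:
--                 in_class = False
--                 i += 1
--             elif c.isspace() and not in_class:
--                 break
--             else:
--                 i += 1
--         tokens.append(pattern_line[start:i])
--     return tokens
-- ===== Notes on version B (the rewrite author's own statement) =====
-- stated objective: alternative
-- what changed: Replaces A's char-by-char state machine (accumulator list plus escaped flag, flushing on whitespace) with a two-pointer tokenizer that skips whitespace and then scans each whole token's span in one inner loop (consuming escape pairs two chars at a time) and slices it out directly.
import Mathlib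
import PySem

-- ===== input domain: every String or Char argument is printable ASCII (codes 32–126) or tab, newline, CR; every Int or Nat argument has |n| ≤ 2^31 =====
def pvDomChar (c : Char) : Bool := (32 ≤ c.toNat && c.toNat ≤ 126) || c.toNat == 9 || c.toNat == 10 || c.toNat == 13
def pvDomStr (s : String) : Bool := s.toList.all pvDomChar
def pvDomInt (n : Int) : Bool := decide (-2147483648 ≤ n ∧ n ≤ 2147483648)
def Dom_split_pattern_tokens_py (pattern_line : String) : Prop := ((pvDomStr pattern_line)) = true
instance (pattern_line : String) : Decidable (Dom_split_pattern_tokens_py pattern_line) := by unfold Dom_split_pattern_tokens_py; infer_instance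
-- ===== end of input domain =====

-- B replaces A's char-by-char state machine (accumulator list + escaped flag) by a two-pointer
-- scanner that slices out each whole token in one inner scan; objective: alternative structure, no speed claim.

-- ===== PORT A =====
-- A's for-loop as structural recursion over the same state (tokens, current, in_char_class, escaped);
-- "".join(current) is String.mk, the trailing 'if current:' flush is the [] case.
def pvALoop : List Char → List String → List Char → Bool → Bool → List String
  | [], toks, cur, _, _ => if cur = [] then toks else toks ++ [String.mk cur]
  | c :: cs, toks, cur, inClass, escaped =>
    if escaped = true then pvALoop cs toks (cur ++ [c]) inClass false
    else if c = '\\' then pvALoop cs toks (cur ++ [c]) inClass true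
    else if c = '[' then pvALoop cs toks (cur ++ [c]) true escaped
    else if c = ']' ∧ inClass = true then pvALoop cs toks (cur ++ [c]) false escaped
    else if PySem.Chars.isspace c = true ∧ inClass = false then
      pvALoop cs (if cur = [] then toks else toks ++ [String.mk cur]) [] inClass escaped
    else pvALoop cs toks (cur ++ [c]) inClass escaped

def split_pattern_tokens_py (pattern_line : String) : List String :=
  pvALoop pattern_line.toList [] [] false false

-- ===== PORT B =====
-- B's inner while loop: the index pair (start, i) becomes consumed-prefix / remaining-suffix;
-- 'i += 2' on a backslash consumes two chars at once (clamped at the end, like the Python slice).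
def pvBScan : List Char → Bool → List Char × List Char
  | [], _ => ([], [])
  | c :: cs, inClass =>
    if c = '\\' then
      match cs with
      | [] => ([c], [])
      | d :: ds => let p := pvBScan ds inClass; (c :: d :: p.1, p.2)
    else if c = '[' then let p := pvBScan cs true; (c :: p.1, p.2)
    else if c = ']' ∧ inClass = true then let p := pvBScan cs false; (c :: p.1, p.2)
    else if PySem.Chars.isspace c = true ∧ inClass = false then ([], c :: cs)
    else let p := pvBScan cs inClass; (c :: p.1, p.2)

-- unfolding equations for pvBScan (literal char tests reduce definitionally) — used by the
-- termination proof of pvBGo below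
theorem pvBScan_nil (b : Bool) : pvBScan [] b = ([], []) := rfl
theorem pvBScan_bs1 (b : Bool) : pvBScan ['\\'] b = (['\\'], []) := rfl
theorem pvBScan_bs (b : Bool) (d : Char) (ds : List Char) :
    pvBScan ('\\' :: d :: ds) b = ('\\' :: d :: (pvBScan ds b).1, (pvBScan ds b).2) := rfl
theorem pvBScan_lb (b : Bool) (cs : List Char) :
    pvBScan ('[' :: cs) b = ('[' :: (pvBScan cs true).1, (pvBScan cs true).2) := by
  rw [pvBScan.eq_def]; dsimp only; rw [if_neg (by decide), if_pos rfl]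
theorem pvBScan_rb_true (cs : List Char) :
    pvBScan (']' :: cs) true = (']' :: (pvBScan cs false).1, (pvBScan cs false).2) := by
  rw [pvBScan.eq_def]; dsimp only
  rw [if_neg (by decide), if_neg (by decide), if_pos (by simp)]
theorem pvBScan_rb_false (cs : List Char) :
    pvBScan (']' :: cs) false = (']' :: (pvBScan cs false).1, (pvBScan cs false).2) := by
  rw [pvBScan.eq_def]; dsimp only
  rw [if_neg (by decide), if_neg (by decide), if_neg (by simp), if_neg (by decide)]
theorem pv_space_ne_backslash (c : Char) (h : PySem.Chars.isspace c = true) : ¬ c = '\\' := by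
  intro h'; subst h'; exact absurd h (by decide)
theorem pv_space_ne_lbrack (c : Char) (h : PySem.Chars.isspace c = true) : ¬ c = '[' := by
  intro h'; subst h'; exact absurd h (by decide)
theorem pv_space_ne_rbrack (c : Char) (h : PySem.Chars.isspace c = true) : ¬ c = ']' := by
  intro h'; subst h'; exact absurd h (by decide)
theorem pvBScan_space (c : Char) (cs : List Char) (h : PySem.Chars.isspace c = true) :
    pvBScan (c :: cs) false = ([], c :: cs) := by
  rw [pvBScan.eq_def]; dsimp only
  rw [if_neg (pv_space_ne_backslash c h), if_neg (pv_space_ne_lbrack c h),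
      if_neg (by simp [pv_space_ne_rbrack c h]), if_pos (by simp [h])]
theorem pvBScan_other (c : Char) (cs : List Char) (b : Bool)
    (h1 : ¬ c = '\\') (h2 : ¬ c = '[') (h3 : ¬ (c = ']' ∧ b = true))
    (h4 : ¬ (PySem.Chars.isspace c = true ∧ b = false)) :
    pvBScan (c :: cs) b = (c :: (pvBScan cs b).1, (pvBScan cs b).2) := by
  rw [pvBScan.eq_def]; dsimp only
  rw [if_neg h1, if_neg h2, if_neg h3, if_neg h4]

theorem pvBScan_rest_le : ∀ (n : Nat) (l : List Char), l.length ≤ n →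
    ∀ (b : Bool), (pvBScan l b).2.length ≤ l.length := by
  intro n
  induction n with
  | zero => intro l hl b; rw [List.length_eq_zero_iff.mp (Nat.le_zero.mp hl)]; simp [pvBScan_nil]
  | succ n ih =>
    intro l hl b
    match l with
    | [] => simp [pvBScan_nil]
    | c :: cs =>
      simp only [List.length_cons] at hl
      by_cases h1 : c = '\\'
      · subst h1
        match cs with
        | [] => simp [pvBScan_bs1]
        | d :: ds =>
          have := ih ds (by simp at hl ⊢; omega) b
          simp only [pvBScan_bs]; simp at this ⊢; omega
      · by_cases h2 : c = '['
        · subst h2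
          have := ih cs (by omega) true
          simp only [pvBScan_lb]; simp; omega
        · by_cases h3 : c = ']' ∧ b = true
          · obtain ⟨rfl, rfl⟩ := h3
            have := ih cs (by omega) false
            simp only [pvBScan_rb_true]; simp; omega
          · by_cases h4 : PySem.Chars.isspace c = true ∧ b = false
            · obtain ⟨hs, rfl⟩ := h4
              simp [pvBScan_space c cs hs]
            · have := ih cs (by omega) b
              rw [pvBScan_other c cs b h1 h2 h3 h4]
              simp; omega

theorem pvBScan_rest_lt (c : Char) (cs : List Char)
    (h : ¬ PySem.Chars.isspace c = true) :
    (pvBScan (c :: cs) false).2.length < (c :: cs).length := by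
  have hle := pvBScan_rest_le cs.length cs le_rfl
  by_cases h1 : c = '\\'
  · subst h1
    match cs with
    | [] => simp [pvBScan_bs1]
    | d :: ds =>
      have := pvBScan_rest_le ds.length ds le_rfl false
      simp only [pvBScan_bs]; simp; omega
  · by_cases h2 : c = '['
    · subst h2
      have := pvBScan_rest_le cs.length cs le_rfl true
      simp only [pvBScan_lb]; simp; omega
    · by_cases h3 : c = ']'
      · subst h3
        have := pvBScan_rest_le cs.length cs le_rfl false
        simp only [pvBScan_rb_false]; simp; omega
      · have := pvBScan_rest_le cs.length cs le_rfl false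
        rw [pvBScan_other c cs false h1 h2 (by simp [h3]) (by simp [h])]
        simp; omega

-- B's outer while loop: skip one whitespace char, or emit the scanned token and continue on the rest.
def pvBGo : List Char → List String
  | [] => []
  | c :: cs =>
    if PySem.Chars.isspace c = true then pvBGo cs
    else String.mk (pvBScan (c :: cs) false).1 :: pvBGo (pvBScan (c :: cs) false).2
termination_by l => l.length
decreasing_by
  · simp
  · exact pvBScan_rest_lt c cs (by assumption)

def split_pattern_tokens_py_alt (pattern_line : String) : List String :=
  pvBGo pattern_line.toList

-- ===== PRECONDITION & SPEC =====
def Spec_split_pattern_tokens_py (pattern_line : String) (out : List String) : Prop := out = split_pattern_tokens_py_alt pattern_line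
instance (pattern_line : String) (out : List String) : Decidable (Spec_split_pattern_tokens_py pattern_line out) := by unfold Spec_split_pattern_tokens_py; infer_instance

-- ===== CLAIM (what is proved, stated in full; the proofs are below) =====
def Claim_equal_split_pattern_tokens_py : Prop := ∀ (pattern_line : String), Dom_split_pattern_tokens_py pattern_line → Spec_split_pattern_tokens_py pattern_line (split_pattern_tokens_py pattern_line)

-- ===== LEMMAS AND PROOFS =====

-- unfolding equations for pvALoop, mirroring those of pvBScan
theorem pvALoop_nil (toks : List String) (cur : List Char) (b e : Bool) :
    pvALoop [] toks cur b e = if cur = [] then toks else toks ++ [String.mk cur] := rfl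
theorem pvALoop_esc (c : Char) (cs : List Char) (toks : List String) (cur : List Char) (b : Bool) :
    pvALoop (c :: cs) toks cur b true = pvALoop cs toks (cur ++ [c]) b false := rfl
theorem pvALoop_bs (cs : List Char) (toks : List String) (cur : List Char) (b : Bool) :
    pvALoop ('\\' :: cs) toks cur b false = pvALoop cs toks (cur ++ ['\\']) b true := rfl
theorem pvALoop_lb (cs : List Char) (toks : List String) (cur : List Char) (b : Bool) :
    pvALoop ('[' :: cs) toks cur b false = pvALoop cs toks (cur ++ ['[']) true false := rfl
theorem pvALoop_rb_true (cs : List Char) (toks : List String) (cur : List Char) :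
    pvALoop (']' :: cs) toks cur true false = pvALoop cs toks (cur ++ [']']) false false := rfl
theorem pvALoop_rb_false (cs : List Char) (toks : List String) (cur : List Char) :
    pvALoop (']' :: cs) toks cur false false = pvALoop cs toks (cur ++ [']']) false false := rfl
theorem pvALoop_space (c : Char) (cs : List Char) (toks : List String) (cur : List Char)
    (h : PySem.Chars.isspace c = true) :
    pvALoop (c :: cs) toks cur false false
      = pvALoop cs (if cur = [] then toks else toks ++ [String.mk cur]) [] false false := by
  simp only [pvALoop]
  rw [if_neg (by simp), if_neg (pv_space_ne_backslash c h), if_neg (pv_space_ne_lbrack c h),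
      if_neg (by simp [pv_space_ne_rbrack c h]), if_pos (by simp [h])]
theorem pvALoop_other (c : Char) (cs : List Char) (toks : List String) (cur : List Char) (b : Bool)
    (h1 : ¬ c = '\\') (h2 : ¬ c = '[') (h3 : ¬ (c = ']' ∧ b = true))
    (h4 : ¬ (PySem.Chars.isspace c = true ∧ b = false)) :
    pvALoop (c :: cs) toks cur b false = pvALoop cs toks (cur ++ [c]) b false := by
  simp only [pvALoop]
  rw [if_neg (by simp), if_neg h1, if_neg h2, if_neg h3, if_neg h4]

-- Running A's loop (escaped = False) equals: move exactly B's scanned span into the accumulator,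
-- landing just before the stopping whitespace (or at the end), with the char class closed.
theorem pvA_eq_scan : ∀ (n : Nat) (l : List Char), l.length ≤ n →
    ∀ (b : Bool) (toks : List String) (cur : List Char),
    pvALoop l toks cur b false
      = pvALoop (pvBScan l b).2 toks (cur ++ (pvBScan l b).1) false false := by
  intro n
  induction n with
  | zero =>
    intro l hl b toks cur
    rw [List.length_eq_zero_iff.mp (Nat.le_zero.mp hl)]
    simp [pvBScan_nil, pvALoop_nil]
  | succ n ih =>
    intro l hl b toks cur
    match l with
    | [] => simp [pvBScan_nil, pvALoop_nil]
    | c :: cs =>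
      simp only [List.length_cons] at hl
      by_cases h1 : c = '\\'
      · subst h1
        match cs with
        | [] =>
          simp [pvBScan_bs1, pvALoop_bs, pvALoop_nil]
        | d :: ds =>
          rw [pvALoop_bs, pvALoop_esc, ih ds (by simp at hl ⊢; omega) b, pvBScan_bs]
          simp [List.append_assoc]
      · by_cases h2 : c = '['
        · subst h2
          rw [pvALoop_lb, ih cs (by omega) true, pvBScan_lb]
          simp [List.append_assoc]
        · by_cases h3 : c = ']'
          · subst h3
            cases b with
            | true =>
              rw [pvALoop_rb_true, ih cs (by omega) false, pvBScan_rb_true]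
              simp [List.append_assoc]
            | false =>
              rw [pvALoop_rb_false, ih cs (by omega) false, pvBScan_rb_false]
              simp [List.append_assoc]
          · by_cases h4 : PySem.Chars.isspace c = true ∧ b = false
            · obtain ⟨hs, rfl⟩ := h4
              rw [pvBScan_space c cs hs]
              simp
            · rw [pvALoop_other c cs toks cur b h1 h2 (by simp [h3]) h4,
                  ih cs (by omega) b, pvBScan_other c cs b h1 h2 (by simp [h3]) h4]
              simp [List.append_assoc]

theorem pvBScan_fst_ne_nil (c : Char) (cs : List Char) (h : ¬ PySem.Chars.isspace c = true) :
    (pvBScan (c :: cs) false).1 ≠ [] := by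
  by_cases h1 : c = '\\'
  · subst h1
    match cs with
    | [] => simp [pvBScan_bs1]
    | d :: ds => simp [pvBScan_bs]
  · by_cases h2 : c = '['
    · subst h2; simp [pvBScan_lb]
    · by_cases h3 : c = ']'
      · subst h3; simp [pvBScan_rb_false]
      · rw [pvBScan_other c cs false h1 h2 (by simp [h3]) (by simp [h])]; simp

-- where B's scanner stops: either the end of the input or a whitespace char outside any class.
theorem pvBScan_rest_shape : ∀ (n : Nat) (l : List Char), l.length ≤ n → ∀ (b : Bool),
    (pvBScan l b).2 = [] ∨
      ∃ d r', (pvBScan l b).2 = d :: r' ∧ PySem.Chars.isspace d = true := by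
  intro n
  induction n with
  | zero =>
    intro l hl b
    rw [List.length_eq_zero_iff.mp (Nat.le_zero.mp hl)]; simp [pvBScan_nil]
  | succ n ih =>
    intro l hl b
    match l with
    | [] => simp [pvBScan_nil]
    | c :: cs =>
      simp only [List.length_cons] at hl
      by_cases h1 : c = '\\'
      · subst h1
        match cs with
        | [] => simp [pvBScan_bs1]
        | d :: ds =>
          have := ih ds (by simp at hl ⊢; omega) b
          simpa [pvBScan_bs] using this
      · by_cases h2 : c = '['
        · subst h2
          have := ih cs (by omega) true
          simpa [pvBScan_lb] using this
        · by_cases h3 : c = ']' ∧ b = true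
          · obtain ⟨rfl, rfl⟩ := h3
            have := ih cs (by omega) false
            simpa [pvBScan_rb_true] using this
          · by_cases h4 : PySem.Chars.isspace c = true ∧ b = false
            · obtain ⟨hs, rfl⟩ := h4
              right; exact ⟨c, cs, by simp [pvBScan_space c cs hs], hs⟩
            · have := ih cs (by omega) b
              rw [pvBScan_other c cs b h1 h2 h3 h4]
              simpa using this

theorem pv_main : ∀ (n : Nat) (l : List Char), l.length ≤ n → ∀ (toks : List String),
    pvALoop l toks [] false false = toks ++ pvBGo l := by
  intro n
  induction n with
  | zero =>
    intro l hl toks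
    rw [List.length_eq_zero_iff.mp (Nat.le_zero.mp hl)]
    simp [pvALoop_nil, pvBGo]
  | succ n ih =>
    intro l hl toks
    match l with
    | [] => simp [pvALoop_nil, pvBGo]
    | c :: cs =>
      simp only [List.length_cons] at hl
      by_cases hsp : PySem.Chars.isspace c = true
      · rw [pvALoop_space c cs toks [] hsp]
        rw [show (if ([] : List Char) = [] then toks else toks ++ [String.mk []]) = toks from by simp]
        rw [ih cs (by omega) toks]
        simp [pvBGo, hsp]
      · have hscan := pvA_eq_scan (c :: cs).length (c :: cs) le_rfl false toks []
        simp only [List.nil_append] at hscan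
        rw [hscan]
        have hne := pvBScan_fst_ne_nil c cs hsp
        have hlt := pvBScan_rest_lt c cs hsp
        rcases pvBScan_rest_shape (c :: cs).length (c :: cs) le_rfl false with hrest | ⟨d, r', hrest, hd⟩
        · rw [hrest, pvALoop_nil, if_neg hne]
          simp [pvBGo, hsp, hrest]
        · rw [hrest, pvALoop_space d r' toks _ hd, if_neg hne]
          rw [hrest] at hlt
          rw [ih r' (by simp at hlt; omega) (toks ++ [String.mk (pvBScan (c :: cs) false).1])]
          have : pvBGo (c :: cs)
              = String.mk (pvBScan (c :: cs) false).1 :: pvBGo (pvBScan (c :: cs) false).2 := by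
            rw [pvBGo]; simp [hsp]
          rw [this, hrest]
          have : pvBGo (d :: r') = pvBGo r' := by rw [pvBGo]; simp [hd]
          rw [this]
          simp

-- ===== VERDICT (by name: the statement is the Claim_ definition above) =====
theorem split_pattern_tokens_py_spec : Claim_equal_split_pattern_tokens_py := by
  intro s _
  unfold Spec_split_pattern_tokens_py split_pattern_tokens_py split_pattern_tokens_py_alt
  simpa using pv_main s.toList.length s.toList le_rfl []
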